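-- pv_equiv track=rewrite | github.com/AcaBehzad/python_practice | filters.py | city_sep
-- ===== SOURCE A (Python) =====
-- def city_sep(all_members: list) -> dict[str:list]:
--     """
--     This function receives the list of all members in our data base and seperate them
--     based on their hometown.
--
--     :param rows: All members
--     :type rows: list
--     :return: a dictionary with keys set as cities, and values are the list of those members living
--     in that city
--     :rtype: dict
--     """
--     city_sep_members = {}
--     for row in all_members:
--         if row['city'] in city_sep_members.keys():
--             city_sep_members[row['city']].append(row)
--         else:
--             city_sep_members[row['city']] = []
--             city_sep_members[row['city']].append(row)
--
--     return city_sep_members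
-- ===== SOURCE B (Python) =====
-- def city_sep(all_members: list) -> dict:
--     # Two-pass version: first the distinct cities in order of first appearance,
--     # then one filter pass per city.  Same mapping and same member order as A.
--     cities = dict.fromkeys(row['city'] for row in all_members)
--     return {c: [row for row in all_members if row['city'] == c] for c in cities}
-- ===== Notes on version B (the rewrite author's own statement) =====
-- stated objective: simpler
-- what changed: Replaces the single incremental hash-grouping loop (check key, create-then-append) by a two-pass decomposition: collect the distinct cities in first-appearance order with dict.fromkeys, then build each city's member list by filtering the whole input, assembled in one dict comprehension.
import Mathlib
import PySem

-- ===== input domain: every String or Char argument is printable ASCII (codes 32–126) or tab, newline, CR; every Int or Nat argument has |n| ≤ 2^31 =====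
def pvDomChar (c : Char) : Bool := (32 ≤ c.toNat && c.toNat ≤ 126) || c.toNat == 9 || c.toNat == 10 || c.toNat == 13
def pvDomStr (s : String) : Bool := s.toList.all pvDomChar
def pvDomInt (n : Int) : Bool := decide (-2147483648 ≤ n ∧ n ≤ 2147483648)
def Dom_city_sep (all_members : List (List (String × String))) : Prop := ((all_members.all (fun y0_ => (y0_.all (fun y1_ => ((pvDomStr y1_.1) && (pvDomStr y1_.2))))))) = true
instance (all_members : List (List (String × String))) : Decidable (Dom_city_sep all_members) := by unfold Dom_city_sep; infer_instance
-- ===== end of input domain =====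

-- B replaces A's one-pass hash grouping by a two-pass decomposition (distinct cities, then one
-- filter per city); same result, simpler to read, not claimed faster.

-- ===== PORT A =====
-- row['city'] as an Option: none is exactly where Python raises KeyError (excluded by Pre_)
def pvCity? (row : List (String × String)) : Option String :=
  PySem.Dict.get? (PySem.Dict.mk row) "city"

def pvStepA (d : PySem.Dict String (List (List (String × String))))
    (row : List (String × String)) : PySem.Dict String (List (List (String × String))) :=
  match pvCity? row with
  | none => d  -- Python raises KeyError here; Pre_city_sep excludes these inputs
  | some c =>
    if d.contains c then
      d.modify c [] (fun ms => ms ++ [row])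
    else
      (d.insert c []).modify c [] (fun ms => ms ++ [row])

def city_sep (all_members : List (List (String × String))) :
    List (String × List (List (String × String))) :=
  (all_members.foldl pvStepA PySem.Dict.empty).items

-- ===== PORT B =====
-- row['city'] in B; the "" default is never used inside Pre_ (B's Python raises KeyError there too)
def pvCity (row : List (String × String)) : String :=
  PySem.Dict.getD (PySem.Dict.mk row) "city" ""

def city_sep_alt (all_members : List (List (String × String))) :
    List (String × List (List (String × String))) :=
  (PySem.List.dedup (all_members.map pvCity)).map
    (fun c => (c, all_members.filter (fun row => pvCity row == c)))

-- ===== PRECONDITION & SPEC =====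
-- Pre_: every row has a 'city' key; on any other input both Pythons raise KeyError.
def Pre_city_sep (all_members : List (List (String × String))) : Prop :=
  ∀ row ∈ all_members, (PySem.Dict.mk row).contains "city" = true

instance (all_members : List (List (String × String))) : Decidable (Pre_city_sep all_members) := by
  unfold Pre_city_sep; infer_instance

def pvWitness_city_sep : (List (List (String × String))) :=
  [[("city", "ann arbor"), ("name", "bo")], [("city", "kyoto")], [("city", "ann arbor"), ("name", "al")]]

def Spec_city_sep (all_members : List (List (String × String))) (out : List (String × List (List (String × String)))) : Prop := out = city_sep_alt all_members
instance (all_members : List (List (String × String))) (out : List (String × List (List (String × String)))) : Decidable (Spec_city_sep all_members out) := by unfold Spec_city_sep; infer_instance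

-- ===== CLAIM (what is proved, stated in full; the proofs are below) =====
def Claim_equal_city_sep : Prop := ∀ (all_members : List (List (String × String))), Dom_city_sep all_members → Pre_city_sep all_members → Spec_city_sep all_members (city_sep all_members)

-- ===== LEMMAS AND PROOFS =====

-- inserting twice at an absent key is one insertion
lemma insert_insert_of_not_contains (d : PySem.Dict String (List (List (String × String))))
    (c : String) (v' v : List (List (String × String))) (hd : d.contains c = false) :
    (d.insert c v').insert c v = d.insert c v := by
  have hnot : ∀ p ∈ d.items, (p.1 == c) = false := by
    intro p hp
    by_contra h
    have : d.contains c = true := List.any_eq_true.mpr ⟨p, hp, by simpa using h⟩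
    simp [this] at hd
  have h1 : d.insert c v' = PySem.Dict.mk (d.items ++ [(c, v')]) := by
    simp [PySem.Dict.insert, hd]
  have h2 : (PySem.Dict.mk (d.items ++ [(c, v')])).contains c = true := by
    simp [PySem.Dict.contains]
  rw [h1]
  simp only [PySem.Dict.insert, h2, hd, if_true]
  congr 1
  simp only [List.map_append]
  rw [List.map_congr_left (fun p hp => by rw [if_neg]; simp [hnot p hp])]
  simp [List.map_id']

-- A's loop body, on a row that has a 'city' key, is a plain modify-append
lemma pvStepA_eq_modify (d : PySem.Dict String (List (List (String × String))))
    (row : List (String × String)) (h : (PySem.Dict.mk row).contains "city" = true) :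
    pvStepA d row = d.modify (pvCity row) [] (fun ms => ms ++ [row]) := by
  have hsome : (pvCity? row).isSome := by
    rw [pvCity?, ← PySem.Dict.contains_eq_isSome_get?]; exact h
  obtain ⟨c, hc⟩ := Option.isSome_iff_exists.mp hsome
  have hcity : pvCity row = c := by simp [pvCity, PySem.Dict.getD, pvCity?] at hc ⊢; simp [hc]
  unfold pvStepA
  rw [hc, hcity]
  by_cases hd : d.contains c
  · simp [hd]
  · simp only [hd, if_neg, Bool.false_eq_true, not_false_eq_true]
    simp only [PySem.Dict.modify, PySem.Dict.getD_insert_self]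
    rw [PySem.Dict.getD_of_not_contains d [] (by simpa using hd)]
    exact insert_insert_of_not_contains d c [] _ (by simpa using hd)

-- keys after one modify-append: the key is added at the back if new
lemma keys_modify_add (d : PySem.Dict String (List (List (String × String))))
    (k : String) (f : List (List (String × String)) → List (List (String × String))) :
    (d.modify k [] f).keys = PySem.Set.add d.keys k := by
  rw [PySem.Dict.keys_modify]
  by_cases h : d.contains k
  · rw [PySem.Dict.keys_insert_of_contains d _ h, PySem.Set.add,
      if_pos (by simpa [PySem.Set.contains, ← PySem.Dict.contains_iff_mem_keys] using h)]
  · rw [PySem.Dict.keys_insert_of_not_contains d _ (by simpa using h), PySem.Set.add,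
      if_neg (by simp [PySem.Set.contains, ← PySem.Dict.contains_iff_mem_keys]; simpa using h)]

-- keys of the whole grouping fold, in first-appearance order
lemma keys_grouping_fold (l : List (List (String × String)))
    (d : PySem.Dict String (List (List (String × String)))) :
    (l.foldl (fun d r => d.modify (pvCity r) [] (fun ms => ms ++ [r])) d).keys
      = PySem.Set.update d.keys (l.map pvCity) := by
  induction l generalizing d with
  | nil => simp [PySem.Set.update]
  | cons r t ih =>
      simp only [List.foldl_cons, List.map_cons, PySem.Set.update, List.foldl_cons]
      rw [ih, ← keys_modify_add d (pvCity r) (fun ms => ms ++ [r])]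
      rfl

-- a dict with nodup keys is its keys paired with their values
lemma items_eq_keys_map (d : PySem.Dict String (List (List (String × String))))
    (h : d.keys.Nodup) :
    d.items = d.keys.map (fun k => (k, d.getD k [])) := by
  rw [PySem.Dict.keys, List.map_map]
  conv_lhs => rw [← List.map_id d.items]
  apply List.map_congr_left
  intro p hp
  have := PySem.Dict.getD_of_mem_items (d := d) (k := p.1) (v := p.2) (by simpa using hp) h []
  simp [Function.comp, this]

-- ===== VERDICT (by name: the statement is the Claim_ definition above) =====
theorem city_sep_spec : Claim_equal_city_sep := by
  intro ms _ hpre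
  unfold Spec_city_sep city_sep city_sep_alt
  have hfold : ms.foldl pvStepA PySem.Dict.empty
      = ms.foldl (fun d r => d.modify (pvCity r) [] (fun l => l ++ [r])) PySem.Dict.empty :=
    PySem.List.foldl_congr_mem ms _ _ _ (fun d r hr => pvStepA_eq_modify d r (hpre r hr))
  rw [hfold]
  set F := ms.foldl (fun d r => d.modify (pvCity r) [] (fun l => l ++ [r])) PySem.Dict.empty with hF
  have hkeys : F.keys = PySem.List.dedup (ms.map pvCity) := by
    rw [hF, keys_grouping_fold, PySem.Dict.keys_empty, PySem.List.dedup_eq_ofList]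
    rfl
  have hnodup : F.keys.Nodup := by
    rw [hkeys, PySem.List.dedup_eq_ofList]; exact PySem.Set.nodup_ofList _
  have hgetD : ∀ c, F.getD c [] = ms.filter (fun row => pvCity row == c) := by
    intro c
    have hm : (ms.map (fun r => (pvCity r, r))).foldl
        (fun d p => d.modify p.1 [] (fun l => l ++ [p.2])) PySem.Dict.empty = F := by
      rw [List.foldl_map]
    rw [← hm, PySem.Dict.getD_foldl_modify_append, PySem.Dict.getD_empty]
    rw [List.filter_map, List.map_map]
    simp only [Function.comp_def]
    simp
  rw [items_eq_keys_map F hnodup, hkeys]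
  apply List.map_congr_left
  intro c _
  rw [hgetD c]
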